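-- pv_equiv track=rewrite | github.com/jjmartens/automated-reasoning | nfa.py | wordInLanguage
-- ===== SOURCE A (Python) =====
-- import itertools
--
-- states = range(7)
--
-- def wordInLanguage(word):
--     clause = "(or "
--     paths = [p for p in itertools.product(states,repeat = len(word))]
--     for p in paths:
--         pathclause = "(and "
--         state = 0
--         for i in range(len(word)):
--             pathclause += "{l}{state}{i} ".format(l=word[i], state=state,i=p[i])
--             state = p[i]
--         pathclause += " F{state})".format(state=state)
--         clause += pathclause
--     clause += ")"
--     return clause
-- ===== SOURCE B (Python) =====
-- def wordInLanguage(word):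
--     def helper(i, state, prefix):
--         if i == len(word):
--             return prefix + " F" + str(state) + ")"
--         return "".join(
--             helper(i + 1, nxt, prefix + word[i] + str(state) + str(nxt) + " ")
--             for nxt in range(7)
--         )
--
--     return "(or " + helper(0, 0, "(and ") + ")"
-- ===== Notes on version B (the rewrite author's own statement) =====
-- stated objective: faster
-- what changed: Replaced the itertools.product enumeration plus a per-path re-walk from state 0 with a recursive DFS over the path tree that shares common prefixes and joins the collected path clauses once.
import Mathlib
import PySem

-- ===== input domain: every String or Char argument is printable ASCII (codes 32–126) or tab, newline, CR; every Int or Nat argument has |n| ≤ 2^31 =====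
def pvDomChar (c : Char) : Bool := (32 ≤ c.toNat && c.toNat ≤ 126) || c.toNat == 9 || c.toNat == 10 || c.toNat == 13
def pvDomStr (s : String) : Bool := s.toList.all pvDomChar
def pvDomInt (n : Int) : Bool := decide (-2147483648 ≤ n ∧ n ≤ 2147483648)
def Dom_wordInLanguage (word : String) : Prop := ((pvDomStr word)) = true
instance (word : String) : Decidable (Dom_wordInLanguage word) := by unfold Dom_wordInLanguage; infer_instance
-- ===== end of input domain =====

-- B replaces the materialized 7^n product list + per-path re-walk with a prefix-sharing
-- recursive DFS over the path tree (faster by a constant factor; same exact output).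

-- ===== PORT A =====
-- states = range(7)
def pvStates : List Int := PySem.List.pyRange 0 7 1

-- itertools.product(states, repeat = n), in product's lexicographic order
def pvProdRep : Nat → List (List Int)
  | 0 => [[]]
  | n + 1 => pvStates.flatMap (fun a => (pvProdRep n).map (a :: ·))

-- the inner 'for i in range(len(word))' loop: walks word and p (same length) in step,
-- accumulating pathclause and the running state exactly as A does
def pvPathLoop : List Char → List Int → Int → String → (String × Int)
  | [], _, state, acc => (acc, state)
  | _, [], state, acc => (acc, state)   -- unreachable: p has the word's length
  | c :: cs, x :: xs, state, acc =>
      pvPathLoop cs xs x (acc ++ String.singleton c ++ PySem.Int.toStr state ++ PySem.Int.toStr x ++ " ")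

def wordInLanguage (word : String) : String :=
  let paths := pvProdRep word.toList.length
  let clause := paths.foldl (fun clause p =>
    let r := pvPathLoop word.toList p 0 "(and "
    clause ++ r.1 ++ " F" ++ PySem.Int.toStr r.2 ++ ")") "(or "
  clause ++ ")"

-- ===== PORT B =====
-- helper(i, state, prefix): DFS returning the joined clause text of its whole subtree
def pvDfs : List Char → Int → String → String
  | [], state, pre => pre ++ " F" ++ PySem.Int.toStr state ++ ")"
  | c :: cs, state, pre =>
      String.join ((PySem.List.pyRange 0 7 1).map (fun nxt =>
        pvDfs cs nxt (pre ++ String.singleton c ++ PySem.Int.toStr state ++ PySem.Int.toStr nxt ++ " ")))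

def wordInLanguage_alt (word : String) : String :=
  "(or " ++ pvDfs word.toList 0 "(and " ++ ")"

-- ===== PRECONDITION & SPEC =====
def Spec_wordInLanguage (word : String) (out : String) : Prop := out = wordInLanguage_alt word
instance (word : String) (out : String) : Decidable (Spec_wordInLanguage word out) := by unfold Spec_wordInLanguage; infer_instance

-- ===== CLAIM (what is proved, stated in full; the proofs are below) =====
def Claim_equal_wordInLanguage : Prop := ∀ (word : String), Dom_wordInLanguage word → Spec_wordInLanguage word (wordInLanguage word)

-- ===== LEMMAS AND PROOFS =====

-- the per-path clause A builds, as a function of the remaining word, path, state and prefix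
def pvClauseOf (cs : List Char) (p : List Int) (state : Int) (pre : String) : String :=
  (pvPathLoop cs p state pre).1 ++ " F" ++ PySem.Int.toStr (pvPathLoop cs p state pre).2 ++ ")"

lemma pvClauseOf_nil (state : Int) (pre : String) :
    pvClauseOf [] [] state pre = pre ++ " F" ++ PySem.Int.toStr state ++ ")" := rfl

lemma pvClauseOf_cons (c : Char) (cs : List Char) (x : Int) (xs : List Int)
    (state : Int) (pre : String) :
    pvClauseOf (c :: cs) (x :: xs) state pre
      = pvClauseOf cs xs x (pre ++ String.singleton c ++ PySem.Int.toStr state ++ PySem.Int.toStr x ++ " ") := rfl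

lemma pvJoin_cons (h : String) (t : List String) :
    String.join (h :: t) = h ++ String.join t := by
  have aux : ∀ (l : List String) (acc : String),
      l.foldl (fun s t => s ++ t) acc = acc ++ String.join l := by
    intro l
    induction l with
    | nil => intro acc; show acc = acc ++ "" ; rw [String.append_empty]
    | cons x xs ih =>
        intro acc
        rw [List.foldl_cons, ih]
        have : String.join (x :: xs) = x ++ String.join xs := by
          show List.foldl (fun s t => s ++ t) "" (x :: xs) = _
          rw [List.foldl_cons, ih, String.empty_append]
        rw [this, String.append_assoc]
  show List.foldl (fun s t => s ++ t) "" (h :: t) = _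
  rw [List.foldl_cons, aux, String.empty_append]

-- main invariant: folding A's per-path clause over all length-|cs| paths equals B's DFS
lemma pvMain (cs : List Char) (state : Int) (pre : String) (acc : String) :
    (pvProdRep cs.length).foldl (fun s p => s ++ pvClauseOf cs p state pre) acc
      = acc ++ pvDfs cs state pre := by
  induction cs generalizing state pre acc with
  | nil =>
      show [[]].foldl (fun s p => s ++ pvClauseOf [] p state pre) acc = _
      rw [List.foldl_cons, List.foldl_nil, pvClauseOf_nil]
      rfl
  | cons c cs ih =>
      show (pvStates.flatMap (fun a => (pvProdRep cs.length).map (a :: ·))).foldl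
              (fun s p => s ++ pvClauseOf (c :: cs) p state pre) acc
            = acc ++ pvDfs (c :: cs) state pre
      have hstates : pvStates = [0, 1, 2, 3, 4, 5, 6] := by decide
      have hrange : PySem.List.pyRange 0 7 1 = [0, 1, 2, 3, 4, 5, 6] := by decide
      have hfold : ∀ (a : Int) (acc : String),
          ((pvProdRep cs.length).map (a :: ·)).foldl
              (fun s p => s ++ pvClauseOf (c :: cs) p state pre) acc
            = acc ++ pvDfs cs a
                (pre ++ String.singleton c ++ PySem.Int.toStr state ++ PySem.Int.toStr a ++ " ") := by
        intro a acc
        rw [List.foldl_map]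
        simpa [pvClauseOf_cons] using
          ih a (pre ++ String.singleton c ++ PySem.Int.toStr state ++ PySem.Int.toStr a ++ " ") acc
      simp only [pvDfs, hstates, hrange, List.flatMap_cons, List.flatMap_nil,
        List.foldl_append, List.append_nil, hfold, List.map_cons, List.map_nil, pvJoin_cons]
      simp [String.append_assoc, String.join]

theorem pvEq (word : String) : wordInLanguage word = wordInLanguage_alt word := by
  have hf : (fun (clause : String) (p : List Int) =>
        let r := pvPathLoop word.toList p 0 "(and "
        clause ++ r.1 ++ " F" ++ PySem.Int.toStr r.2 ++ ")")
      = (fun s p => s ++ pvClauseOf word.toList p 0 "(and ") := by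
    funext s p
    simp [pvClauseOf, String.append_assoc]
  show (pvProdRep word.toList.length).foldl _ "(or " ++ ")" = wordInLanguage_alt word
  rw [hf, pvMain]
  rfl

-- ===== VERDICT (by name: the statement is the Claim_ definition above) =====
theorem wordInLanguage_spec : Claim_equal_wordInLanguage := by
  intro word _
  exact pvEq word
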